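-- pv_equiv track=rewrite | github.com/WuxiiiZ/WuxiZhang_CS526_Homework | CS526_Homework5/Problem2.py | letter_sequence
-- ===== SOURCE A (Python) =====
-- VOWELS = {
--     'A': '.-',
--     'E': '.',
--     'I': '..',
--     'O': '---',
--     'U': '..-',
-- }
--
-- def letter_sequence(arr):
--     memo = {} #memo[(1, i)] memo[(2, i)] memo[(3, i)]
--     n = len(arr)
--     if n == 0:
--         return 0
--
--     def get_combinations(i):
--         '''
--         one_char = arr[i]
--         two_chars = arr[i:i+2]
--         three_chars = arr[i:i+3]
--         '''
--         #base case
--         if i == 0: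
--             for row in [1, 2, 3]:
--                 piece = arr[0:row]
--                 if piece in VOWELS.values():
--                     memo[(row, 0)] = 1
--                 else:
--                     memo[(row, 0)] = 0
--             return get_combinations(i + 1)
--
--         if i < n:
--         #recursion
--             for length in [1, 2, 3]:
--                 piece = arr[i:i+length]
--                 if len(piece) < length:
--                     memo[(length,i)] = 0    # Here in fact is None, but for algorithm we set it as 0
--                 elif piece in VOWELS.values():
--                     for index in [1, 2, 3]:
--                         if i-index < 0:
--                             memo[(index,i-index)] = 0
--                     memo[(length,i)] = memo[(1,i-1)] + memo[(2,i-2)] + memo[(3,i-3)]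
--                 else:
--                     memo[(length,i)] = 0
--             return get_combinations(i+1)
--
--         elif i == n:
--             return memo[(1,i-1)]+ memo[(2,i-2)] + memo[(3,i-3)]
--
--     return get_combinations(0)
-- ===== SOURCE B (Python) =====
-- def letter_sequence(arr):
--     codes = ('.-', '.', '..', '---', '..-')
--     n = len(arr)
--     if n == 0:
--         return 0
--     dp = [1] + [0] * n
--     for j in range(1, n + 1):
--         total = 0
--         for L in (1, 2, 3):
--             if L <= j and arr[j - L:j] in codes:
--                 total += dp[j - L]
--         dp[j] = total
--     return dp[n]
-- ===== Notes on version B (the rewrite author's own statement) =====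
-- stated objective: simpler
-- what changed: Replaces the recursive forward pass with a (length,i)-keyed memo dict by a single bottom-up loop over a dp array of length n+1 (dp[j] = ways to segment the first j characters), dropping the dict and the recursion entirely (no per-step tuple hashing or call overhead).
import Mathlib
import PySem

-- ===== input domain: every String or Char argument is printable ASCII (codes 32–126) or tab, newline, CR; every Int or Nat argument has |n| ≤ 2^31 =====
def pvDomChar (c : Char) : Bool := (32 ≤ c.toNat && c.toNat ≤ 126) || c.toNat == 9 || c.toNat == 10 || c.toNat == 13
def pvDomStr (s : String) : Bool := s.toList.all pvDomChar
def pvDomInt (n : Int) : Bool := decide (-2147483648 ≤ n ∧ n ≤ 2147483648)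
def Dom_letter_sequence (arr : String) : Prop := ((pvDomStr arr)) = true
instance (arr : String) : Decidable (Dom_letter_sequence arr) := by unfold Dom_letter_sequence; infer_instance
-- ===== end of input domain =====

-- B: bottom-up dp array instead of A's recursive forward pass with a (length,i)-keyed memo dict (simpler; return value equivalence).


-- VOWELS.values() in insertion order: A, E, I, O, U
def pvVowels : List (List Char) := [['.', '-'], ['.'], ['.', '.'], ['-', '-', '-'], ['.', '.', '-']]

-- ===== PORT A =====
def pvNegF (i : Int) (memo : PySem.Dict (Int × Int) Int) : PySem.Dict (Int × Int) Int :=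
  ([1, 2, 3] : List Int).foldl
    (fun m idx => if i - idx < 0 then m.insert (idx, i - idx) 0 else m) memo

def pvInnerA (cs : List Char) (i : Int) (memo : PySem.Dict (Int × Int) Int) (L : Int) :
    PySem.Dict (Int × Int) Int :=
  let piece := PySem.List.slice cs (some i) (some (i + L))
  if (piece.length : Int) < L then memo.insert (L, i) 0
  else if piece ∈ pvVowels then
    let m := pvNegF i memo
    m.insert (L, i) (m.getD (1, i - 1) 0 + m.getD (2, i - 2) 0 + m.getD (3, i - 3) 0)
  else memo.insert (L, i) 0

def pvGetComb (cs : List Char) (n : Int) : Nat → Int → PySem.Dict (Int × Int) Int → Int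
  | 0, _, _ => 0
  | fuel + 1, i, memo =>
    if i == 0 then
      let memo := ([1, 2, 3] : List Int).foldl
        (fun m row =>
          let piece := PySem.List.slice cs (some 0) (some row)
          m.insert (row, 0) (if piece ∈ pvVowels then 1 else 0)) memo
      pvGetComb cs n fuel (i + 1) memo
    else if i < n then
      pvGetComb cs n fuel (i + 1) (([1, 2, 3] : List Int).foldl (pvInnerA cs i) memo)
    else if i == n then
      memo.getD (1, i - 1) 0 + memo.getD (2, i - 2) 0 + memo.getD (3, i - 3) 0
    else 0

def letter_sequence (arr : String) : Int :=
  let cs := arr.toList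
  let n : Int := cs.length
  if n == 0 then 0
  else pvGetComb cs n (cs.length + 1) 0 PySem.Dict.empty


-- ===== PORT B =====
def letter_sequence_alt (arr : String) : Int :=
  let cs := arr.toList
  let n : Int := cs.length
  if n == 0 then 0
  else
    let dp := (PySem.List.pyRange 1 (n + 1) 1).foldl
      (fun dp j =>
        let total := ([1, 2, 3] : List Int).foldl
          (fun t L =>
            if L ≤ j ∧ PySem.List.slice cs (some (j - L)) (some j) ∈ pvVowels
            then t + PySem.List.pyGetD dp (j - L) 0 else t) 0
        PySem.List.pySetD dp j total)
      (1 :: List.replicate cs.length 0)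
    PySem.List.pyGetD dp n 0

-- ===== PRECONDITION & SPEC =====
-- A raises KeyError on every string of length 1 or 2 (it reads memo entries at negative
-- indices that were never written); Pre_ excludes exactly those inputs.
def Pre_letter_sequence (arr : String) : Prop :=
  PySem.Str.len arr ≠ 1 ∧ PySem.Str.len arr ≠ 2
instance (arr : String) : Decidable (Pre_letter_sequence arr) := by
  unfold Pre_letter_sequence; infer_instance
def pvWitness_letter_sequence : String := "..."

def Spec_letter_sequence (arr : String) (out : Int) : Prop := out = letter_sequence_alt arr
instance (arr : String) (out : Int) : Decidable (Spec_letter_sequence arr out) := by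
  unfold Spec_letter_sequence; infer_instance

-- ===== CLAIM (what is proved, stated in full; the proofs are below) =====
def Claim_equal_letter_sequence : Prop :=
  ∀ (arr : String), Dom_letter_sequence arr → Pre_letter_sequence arr →
    Spec_letter_sequence arr (letter_sequence arr)

-- ===== LEMMAS AND PROOFS =====

-- the mathematical recurrence both programs compute: pvD cs j = number of ways to
-- segment the first j characters of cs into Morse vowel codes
def pvPiece (cs : List Char) (s e : Nat) : List Char := (cs.drop s).take (e - s)

def pvD (cs : List Char) : Nat → Int
  | 0 => 1
  | j + 1 =>
      (if pvPiece cs j (j + 1) ∈ pvVowels then pvD cs j else 0)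
    + (if 1 ≤ j ∧ pvPiece cs (j - 1) (j + 1) ∈ pvVowels then pvD cs (j - 1) else 0)
    + (if 2 ≤ j ∧ pvPiece cs (j - 2) (j + 1) ∈ pvVowels then pvD cs (j - 2) else 0)

-- intended value of memo[(L, k)] once step k has run (0 on the negative padding keys)
def pvM (cs : List Char) (n L k : Int) : Int :=
  if k < 0 then 0
  else if n < k + L then 0
  else if pvPiece cs k.toNat (k + L).toNat ∈ pvVowels then pvD cs k.toNat else 0

def pvInv (cs : List Char) (n i : Int) (memo : PySem.Dict (Int × Int) Int) : Prop :=
  ∀ a ∈ ([1, 2, 3] : List Int), ∀ k : Int, k < i → memo.getD (a, k) 0 = pvM cs n a k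

def pvH0 (memo : PySem.Dict (Int × Int) Int) : Prop :=
  ∀ a ∈ ([1, 2, 3] : List Int), ∀ k : Int, k < 0 → memo.getD (a, k) 0 = 0

theorem pvM_neg (cs : List Char) (n L k : Int) (h : k < 0) : pvM cs n L k = 0 := by
  simp [pvM, h]

theorem pvInv_h0 (cs : List Char) (n i : Int) (memo : PySem.Dict (Int × Int) Int)
    (h1 : 1 ≤ i) (hInv : pvInv cs n i memo) : pvH0 memo := by
  intro a ha k hk
  rw [hInv a ha k (by omega)]
  exact pvM_neg cs n a k hk

-- B's loop body, named for the proofs (definitionally the foldl body of letter_sequence_alt)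
def pvStepB (cs : List Char) (dp : List Int) (j : Int) : List Int :=
  let total := ([1, 2, 3] : List Int).foldl
    (fun t L =>
      if L ≤ j ∧ PySem.List.slice cs (some (j - L)) (some j) ∈ pvVowels
      then t + PySem.List.pyGetD dp (j - L) 0 else t) 0
  PySem.List.pySetD dp j total

-- the dp array after iteration m
def pvDp (cs : List Char) (m : Nat) : List Int :=
  (List.range (cs.length + 1)).map (fun j => if j ≤ m then pvD cs j else 0)

theorem pvDp_zero (cs : List Char) : pvDp cs 0 = 1 :: List.replicate cs.length 0 := by
  apply List.ext_getElem
  · simp [pvDp]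
  · intro k h1 h2
    simp only [pvDp] at *
    rcases k with _ | k <;>
      simp_all [List.getElem_map, List.getElem_range, pvD, List.getElem_cons_succ]

theorem addif (t x : Int) (c : Prop) [Decidable c] :
    (if c then t + x else t) = t + (if c then x else 0) := by
  split_ifs <;> ring

theorem pvDp_getD (cs : List Char) (m j : Nat) (hj : j ≤ m) (hj2 : j ≤ cs.length) :
    (pvDp cs m).getD j 0 = pvD cs j := by
  rw [pvDp, PySem.List.getD_map_range _ _ _ _ (by omega), if_pos hj]

set_option maxRecDepth 4000 in
theorem pvStepB_dp (cs : List Char) (m : Nat) (hm : m < cs.length) :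
    pvStepB cs (pvDp cs m) ((m : Int) + 1) = pvDp cs (m + 1) := by
  have hcast : ((m : Int) + 1) = ((m + 1 : Nat) : Int) := by push_cast; ring
  have htot : (([1, 2, 3] : List Int).foldl
      (fun t L =>
        if L ≤ (m : Int) + 1 ∧
            PySem.List.slice cs (some ((m : Int) + 1 - L)) (some ((m : Int) + 1)) ∈ pvVowels
        then t + PySem.List.pyGetD (pvDp cs m) ((m : Int) + 1 - L) 0 else t) 0)
      = pvD cs (m + 1) := by
    have e1 : ((m : Int) + 1 - 1) = ((m : Nat) : Int) := by ring
    have g1 : PySem.List.slice cs (some ((m : Int))) (some ((m : Int) + 1)) =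
        pvPiece cs m (m + 1) := by
      rw [hcast, PySem.List.slice_natCast]; rfl
    have e2 : ((m : Int) + 1 - 2) = ((m : Int) - 1) := by ring
    have e3 : ((m : Int) + 1 - 3) = ((m : Int) - 2) := by ring
    simp only [List.foldl, e1, e2, e3, g1]
    rw [addif, addif, addif]
    by_cases h1 : 1 ≤ m
    · have f2 : ((m : Int) - 1) = ((m - 1 : Nat) : Int) := by omega
      have g2 : PySem.List.slice cs (some ((m : Int) - 1)) (some ((m : Int) + 1))
          = pvPiece cs (m - 1) (m + 1) := by
        rw [f2, hcast, PySem.List.slice_natCast]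
        rfl
      by_cases h2 : 2 ≤ m
      · have f3 : ((m : Int) - 2) = ((m - 2 : Nat) : Int) := by omega
        have g3 : PySem.List.slice cs (some ((m : Int) - 2)) (some ((m : Int) + 1))
            = pvPiece cs (m - 2) (m + 1) := by
          rw [f3, hcast, PySem.List.slice_natCast]
          rfl
        rw [g2, g3, f2, f3, PySem.List.pyGetD_natCast, PySem.List.pyGetD_natCast,
          PySem.List.pyGetD_natCast, pvDp_getD cs m m le_rfl (by omega),
          pvDp_getD cs m (m-1) (by omega) (by omega), pvDp_getD cs m (m-2) (by omega) (by omega)]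
        rw [pvD]
        have t1 : (1:Int) ≤ (m:Int)+1 := by omega
        have t2 : (2:Int) ≤ (m:Int)+1 := by omega
        have t3 : (3:Int) ≤ (m:Int)+1 := by omega
        simp [t1, t2, t3, h1, h2]
      · have t1 : (1:Int) ≤ (m:Int)+1 := by omega
        have t2 : (2:Int) ≤ (m:Int)+1 := by omega
        have t3 : ¬((3:Int) ≤ (m:Int)+1) := by omega
        rw [pvD]
        have d1 : (pvDp cs m).getD m 0 = pvD cs m := pvDp_getD cs m m le_rfl (by omega)
        have d2 : (pvDp cs m).getD (m-1) 0 = pvD cs (m-1) :=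
          pvDp_getD cs m (m-1) (by omega) (by omega)
        rw [g2,
          if_neg (show ¬((3:Int) ≤ (m:Int)+1 ∧
              PySem.List.slice cs (some ((m:Int)-2)) (some ((m:Int)+1)) ∈ pvVowels)
            from fun h => t3 h.1),
          if_neg (show ¬(2 ≤ m ∧ pvPiece cs (m-2) (m+1) ∈ pvVowels) from fun h => h2 h.1)]
        simp only [f2, PySem.List.pyGetD_natCast]
        rw [d1, d2]
        simp only [and_iff_right t1, and_iff_right t2, and_iff_right h1]
        ring
    · rw [pvD]
      have t1 : (1:Int) ≤ (m:Int)+1 := by omega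
      have t2 : ¬((2:Int) ≤ (m:Int)+1) := by omega
      have t3 : ¬((3:Int) ≤ (m:Int)+1) := by omega
      have d1 : (pvDp cs m).getD m 0 = pvD cs m := pvDp_getD cs m m le_rfl (by omega)
      rw [if_neg (show ¬((2:Int) ≤ (m:Int)+1 ∧
              PySem.List.slice cs (some ((m:Int)-1)) (some ((m:Int)+1)) ∈ pvVowels)
            from fun h => t2 h.1),
        if_neg (show ¬((3:Int) ≤ (m:Int)+1 ∧
              PySem.List.slice cs (some ((m:Int)-2)) (some ((m:Int)+1)) ∈ pvVowels)
            from fun h => t3 h.1),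
        if_neg (show ¬(1 ≤ m ∧ pvPiece cs (m-1) (m+1) ∈ pvVowels) from fun h => h1 h.1),
        if_neg (show ¬(2 ≤ m ∧ pvPiece cs (m-2) (m+1) ∈ pvVowels)
            from fun h => h1 (le_trans one_le_two h.1))]
      simp only [PySem.List.pyGetD_natCast]
      rw [d1]
      simp only [and_iff_right t1]
      ring
  simp only [pvStepB]
  rw [htot, hcast, PySem.List.pySetD_natCast]
  apply List.ext_getElem
  · simp [pvDp]
  · intro k hk1 hk2
    simp only [List.getElem_set, pvDp, List.getElem_map, List.getElem_range]
    split_ifs <;> simp_all <;> omega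

theorem pvB_fold (cs : List Char) (m : Nat) (hm : m ≤ cs.length) :
    (PySem.List.pyRange 1 ((m : Int) + 1) 1).foldl (pvStepB cs) (pvDp cs 0) = pvDp cs m := by
  induction m with
  | zero => rw [PySem.List.pyRange_one_eq_nil (by omega)]; rfl
  | succ k ih =>
    have hc : ((k + 1 : Nat) : Int) + 1 = ((k : Int) + 1) + 1 := by push_cast; ring
    rw [hc, PySem.List.pyRange_one_succ_right (by omega), List.foldl_append,
      ih (by omega)]
    exact pvStepB_dp cs k (by omega)

theorem pvB_eq (arr : String) (h : arr.toList ≠ []) :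
    letter_sequence_alt arr = pvD arr.toList arr.toList.length := by
  have hlen : 0 < arr.toList.length := List.length_pos_iff.mpr h
  rw [letter_sequence_alt]
  simp only []
  rw [if_neg (by simp only [beq_iff_eq]; omega)]
  have hfold := pvB_fold arr.toList arr.toList.length le_rfl
  rw [show ((arr.toList.length : Int) + 1) = ((arr.toList.length : Nat) : Int) + 1 from rfl]
  rw [← pvDp_zero arr.toList]
  show PySem.List.pyGetD
    ((PySem.List.pyRange 1 ((arr.toList.length : Int) + 1) 1).foldl (pvStepB arr.toList)
      (pvDp arr.toList 0)) (arr.toList.length : Int) 0 = _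
  rw [hfold, PySem.List.pyGetD_natCast,
    pvDp_getD arr.toList arr.toList.length arr.toList.length le_rfl le_rfl]

theorem pvNegF_getD_nonneg (i : Int) (memo : PySem.Dict (Int × Int) Int) (a k : Int)
    (hk : 0 ≤ k) : (pvNegF i memo).getD (a, k) 0 = memo.getD (a, k) 0 := by
  rw [pvNegF]
  simp only [List.foldl]
  split_ifs <;>
    simp_all [PySem.Dict.getD_insert, Prod.ext_iff] <;> omega

theorem pvNegF_reads (i : Int) (memo : PySem.Dict (Int × Int) Int)
    (idx : Int) (hidx : idx ∈ ([1, 2, 3] : List Int)) :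
    (pvNegF i memo).getD (idx, i - idx) 0
      = if i - idx < 0 then 0 else memo.getD (idx, i - idx) 0 := by
  by_cases hneg : i - idx < 0
  · rw [if_pos hneg, pvNegF]
    simp only [List.foldl]
    fin_cases hidx <;>
      split_ifs <;>
        simp_all [PySem.Dict.getD_insert, Prod.ext_iff]
  · rw [if_neg hneg]
    exact pvNegF_getD_nonneg i memo idx (i - idx) (by omega)

theorem pvInnerA_getD_lt (cs : List Char) (i L : Int) (memo : PySem.Dict (Int × Int) Int)
    (a k : Int) (hk : k < i) (h0 : pvH0 memo)
    (ha : a ∈ ([1, 2, 3] : List Int)) :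
    (pvInnerA cs i memo L).getD (a, k) 0 = memo.getD (a, k) 0 := by
  rw [pvInnerA]
  split_ifs with hlen hcode
  · rw [PySem.Dict.getD_insert, if_neg (by simp [Prod.ext_iff]; omega)]
  · rw [PySem.Dict.getD_insert, if_neg (by simp [Prod.ext_iff]; omega)]
    by_cases hkneg : k < 0
    · rw [h0 a ha k hkneg, pvNegF]
      simp only [List.foldl]
      split_ifs <;>
        simp_all [PySem.Dict.getD_insert, Prod.ext_iff] <;>
          (intros; first
            | omega
            | exact h0 a (by simpa using ha) k hkneg)
    · exact pvNegF_getD_nonneg i memo a k (by omega)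
  · rw [PySem.Dict.getD_insert, if_neg (by simp [Prod.ext_iff]; omega)]

theorem pvInnerA_getD_ne (cs : List Char) (i L : Int) (memo : PySem.Dict (Int × Int) Int)
    (a : Int) (h1 : 1 ≤ i) (ha : a ≠ L) :
    (pvInnerA cs i memo L).getD (a, i) 0 = memo.getD (a, i) 0 := by
  rw [pvInnerA]
  split_ifs with hlen hcode
  · rw [PySem.Dict.getD_insert, if_neg (by simp [Prod.ext_iff]; tauto)]
  · rw [PySem.Dict.getD_insert, if_neg (by simp [Prod.ext_iff]; tauto)]
    exact pvNegF_getD_nonneg i memo a i (by omega)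
  · rw [PySem.Dict.getD_insert, if_neg (by simp [Prod.ext_iff]; tauto)]

theorem pvM_sum (cs : List Char) (n i : Int) (hn : n = (cs.length : Int))
    (h1 : 1 ≤ i) (h2 : i ≤ n) :
    pvM cs n 1 (i - 1) + pvM cs n 2 (i - 2) + pvM cs n 3 (i - 3) = pvD cs i.toNat := by
  obtain ⟨j, hj⟩ : ∃ j : Nat, i = (j : Int) + 1 := ⟨(i - 1).toNat, by omega⟩
  subst hj hn
  have ht : ((j : Int) + 1).toNat = j + 1 := by omega
  rw [ht, pvD]
  -- first summand
  have m1 : pvM cs (cs.length : Int) 1 ((j : Int) + 1 - 1)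
      = (if pvPiece cs j (j + 1) ∈ pvVowels then pvD cs j else 0) := by
    rw [pvM, if_neg (by omega), if_neg (by omega)]
    have e1 : ((j : Int) + 1 - 1).toNat = j := by omega
    have e2 : ((j : Int) + 1 - 1 + 1).toNat = j + 1 := by omega
    rw [e1, e2]
  have m2 : pvM cs (cs.length : Int) 2 ((j : Int) + 1 - 2)
      = (if 1 ≤ j ∧ pvPiece cs (j - 1) (j + 1) ∈ pvVowels then pvD cs (j - 1) else 0) := by
    by_cases hj1 : 1 ≤ j
    · rw [pvM, if_neg (by omega), if_neg (by omega)]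
      have e1 : ((j : Int) + 1 - 2).toNat = j - 1 := by omega
      have e2 : ((j : Int) + 1 - 2 + 2).toNat = j + 1 := by omega
      rw [e1, e2]
      simp [hj1]
    · rw [pvM, if_pos (by omega)]
      simp [hj1]
  have m3 : pvM cs (cs.length : Int) 3 ((j : Int) + 1 - 3)
      = (if 2 ≤ j ∧ pvPiece cs (j - 2) (j + 1) ∈ pvVowels then pvD cs (j - 2) else 0) := by
    by_cases hj2 : 2 ≤ j
    · rw [pvM, if_neg (by omega), if_neg (by omega)]
      have e1 : ((j : Int) + 1 - 3).toNat = j - 2 := by omega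
      have e2 : ((j : Int) + 1 - 3 + 3).toNat = j + 1 := by omega
      rw [e1, e2]
      simp [hj2]
    · rw [pvM, if_pos (by omega)]
      simp [hj2]
  rw [m1, m2, m3]

theorem pvInnerA_getD_self (cs : List Char) (n i L : Int) (memo : PySem.Dict (Int × Int) Int)
    (hn : n = (cs.length : Int)) (h1 : 1 ≤ i) (h2 : i < n)
    (hL : L ∈ ([1, 2, 3] : List Int)) (hInv : pvInv cs n i memo) :
    (pvInnerA cs i memo L).getD (L, i) 0 = pvM cs n L i := by
  have hL' : 1 ≤ L ∧ L ≤ 3 := by fin_cases hL <;> omega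
  have hlen : ((PySem.List.slice cs (some i) (some (i + L))).length : Int)
      = min (i + L) n - i := by
    rw [PySem.List.length_slice]
    rw [PySem.List.clampIdx, PySem.List.clampIdx]
    rw [if_neg (by omega), if_neg (by omega)]
    omega
  rw [pvInnerA]
  split_ifs with hsh hcode
  · -- piece clipped: i + L > n
    rw [PySem.Dict.getD_insert, if_pos rfl, pvM,
      if_neg (by omega), if_pos (by omega)]
  · -- full piece, a vowel code
    rw [PySem.Dict.getD_insert, if_pos rfl]
    have hfull : ¬ (n < i + L) := by omega
    have hpiece : PySem.List.slice cs (some i) (some (i + L))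
        = pvPiece cs i.toNat (i + L).toNat := by
      rw [PySem.List.slice_toNat cs (by omega) (by omega)]; rfl
    have h0 : pvH0 memo := pvInv_h0 cs n i memo h1 hInv
    have r1 : (pvNegF i memo).getD (1, i - 1) 0 = pvM cs n 1 (i - 1) := by
      rw [pvNegF_reads i memo 1 (by simp), if_neg (by omega)]
      exact hInv 1 (by simp) (i - 1) (by omega)
    have r2 : (pvNegF i memo).getD (2, i - 2) 0 = pvM cs n 2 (i - 2) := by
      rw [pvNegF_reads i memo 2 (by simp)]
      by_cases hg : i - 2 < 0
      · rw [if_pos hg, pvM_neg cs n 2 (i - 2) hg]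
      · rw [if_neg hg]
        exact hInv 2 (by simp) (i - 2) (by omega)
    have r3 : (pvNegF i memo).getD (3, i - 3) 0 = pvM cs n 3 (i - 3) := by
      rw [pvNegF_reads i memo 3 (by simp)]
      by_cases hg : i - 3 < 0
      · rw [if_pos hg, pvM_neg cs n 3 (i - 3) hg]
      · rw [if_neg hg]
        exact hInv 3 (by simp) (i - 3) (by omega)
    rw [r1, r2, r3, pvM_sum cs n i hn h1 (by omega), pvM,
      if_neg (by omega), if_neg hfull, if_pos (hpiece ▸ hcode)]
  · -- full piece, not a code
    rw [PySem.Dict.getD_insert, if_pos rfl, pvM,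
      if_neg (by omega), if_neg (by omega), if_neg (by
        intro hmem
        apply hcode
        rw [PySem.List.slice_toNat cs (by omega) (by omega)]
        exact hmem)]

theorem pvBody_inv (cs : List Char) (n i : Int) (memo : PySem.Dict (Int × Int) Int)
    (hn : n = (cs.length : Int)) (h1 : 1 ≤ i) (h2 : i < n) (hInv : pvInv cs n i memo) :
    pvInv cs n (i + 1) (([1, 2, 3] : List Int).foldl (pvInnerA cs i) memo) := by
  have h0 : pvH0 memo := pvInv_h0 cs n i memo h1 hInv
  simp only [List.foldl]
  set m1 := pvInnerA cs i memo 1 with hm1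
  set m2 := pvInnerA cs i m1 2 with hm2
  set m3 := pvInnerA cs i m2 3 with hm3
  have hInv1 : pvInv cs n i m1 := by
    intro a ha k hk
    rw [hm1, pvInnerA_getD_lt cs i 1 memo a k hk h0 ha]
    exact hInv a ha k hk
  have h01 : pvH0 m1 := pvInv_h0 cs n i m1 h1 hInv1
  have hInv2 : pvInv cs n i m2 := by
    intro a ha k hk
    rw [hm2, pvInnerA_getD_lt cs i 2 m1 a k hk h01 ha]
    exact hInv1 a ha k hk
  have h02 : pvH0 m2 := pvInv_h0 cs n i m2 h1 hInv2
  intro a ha k hk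
  by_cases hki : k = i
  · subst hki
    fin_cases ha
    · rw [hm3, pvInnerA_getD_ne cs k 3 m2 1 h1 (by omega),
        hm2, pvInnerA_getD_ne cs k 2 m1 1 h1 (by omega)]
      exact pvInnerA_getD_self cs n k 1 memo hn h1 h2 (by simp) hInv
    · rw [hm3, pvInnerA_getD_ne cs k 3 m2 2 h1 (by omega)]
      exact pvInnerA_getD_self cs n k 2 m1 hn h1 h2 (by simp) hInv1
    · exact pvInnerA_getD_self cs n k 3 m2 hn h1 h2 (by simp) hInv2
  · have hk' : k < i := by omega
    rw [hm3, pvInnerA_getD_lt cs i 3 m2 a k hk' h02 ha]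
    exact hInv2 a ha k hk'

theorem pvBase_inv (cs : List Char) (n : Int) (hn : n = (cs.length : Int)) (h3 : 3 ≤ n) :
    pvInv cs n 1 (([1, 2, 3] : List Int).foldl
      (fun m row =>
        let piece := PySem.List.slice cs (some 0) (some row)
        m.insert (row, 0) (if piece ∈ pvVowels then 1 else 0)) PySem.Dict.empty) := by
  intro a ha k hk
  simp only [List.foldl]
  by_cases hk0 : k = 0
  · subst hk0
    have hv : ∀ L : Int, 1 ≤ L → L ≤ 3 →
        (if PySem.List.slice cs (some 0) (some L) ∈ pvVowels then (1:Int) else 0)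
          = pvM cs n L 0 := by
      intro L hL1 hL3
      have hp : PySem.List.slice cs (some 0) (some L) = pvPiece cs 0 L.toNat := by
        rw [PySem.List.slice_toNat cs (by omega) (by omega)]; rfl
      have e : ((0:Int) + L).toNat = L.toNat := by omega
      rw [pvM, if_neg (show ¬((0:Int) < 0) from by omega),
        if_neg (show ¬(n < 0 + L) from by omega), e, hp]
      simp [pvD]
    fin_cases ha <;>
      simp [PySem.Dict.getD_insert, Prod.ext_iff] <;>
        [skip; skip; skip] <;> first
          | exact hv 1 (by omega) (by omega)
          | exact hv 2 (by omega) (by omega)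
          | exact hv 3 (by omega) (by omega)
  · have hkneg : k < 0 := by omega
    rw [pvM_neg cs n a k hkneg]
    fin_cases ha <;>
      simp [PySem.Dict.getD_insert, Prod.ext_iff, PySem.Dict.getD_empty] <;> omega

theorem pvGC_run (cs : List Char) (n : Int) (hn : n = (cs.length : Int)) :
    ∀ (fuel : Nat) (i : Int) (memo : PySem.Dict (Int × Int) Int),
      1 ≤ i → i ≤ n → i.toNat + fuel = cs.length + 1 → pvInv cs n i memo →
      pvGetComb cs n fuel i memo = pvD cs cs.length := by
  intro fuel
  induction fuel with
  | zero => intro i memo h1 h2 hf hInv; omega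
  | succ f ih =>
    intro i memo h1 h2 hf hInv
    rw [pvGetComb, if_neg (by simp only [beq_iff_eq]; omega)]
    by_cases hin : i < n
    · rw [if_pos hin]
      exact ih (i + 1) _ (by omega) (by omega) (by omega)
        (pvBody_inv cs n i memo hn h1 hin hInv)
    · have hieq : i = n := by omega
      rw [if_neg hin, if_pos (by simp only [beq_iff_eq]; omega)]
      rw [hInv 1 (by simp) (i - 1) (by omega), hInv 2 (by simp) (i - 2) (by omega),
        hInv 3 (by simp) (i - 3) (by omega),
        pvM_sum cs n i hn h1 (by omega)]
      congr 1
      omega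

theorem pvA_eq (arr : String) (h : 3 ≤ arr.toList.length) :
    letter_sequence arr = pvD arr.toList arr.toList.length := by
  rw [letter_sequence]
  rw [if_neg (by simp only [beq_iff_eq]; omega)]
  rw [show arr.toList.length + 1 = (arr.toList.length) + 1 from rfl]
  rw [pvGetComb, if_pos (by simp)]
  exact pvGC_run arr.toList ((arr.toList.length : Int)) rfl arr.toList.length 1 _
    (by omega) (by omega) (by omega)
    (by
      have := pvBase_inv arr.toList ((arr.toList.length : Int)) rfl (by omega)
      simpa using this)

-- ===== VERDICT (by name: the statement is the Claim_ definition above) =====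
theorem letter_sequence_spec : Claim_equal_letter_sequence := by
  intro arr _ hpre
  unfold Spec_letter_sequence
  obtain ⟨hp1, hp2⟩ := hpre
  simp only [PySem.Str.len_eq] at hp1 hp2
  by_cases h0 : arr.toList.length = 0
  · simp [letter_sequence, letter_sequence_alt, h0]
  · have h3 : 3 ≤ arr.toList.length := by omega
    rw [pvA_eq arr h3, pvB_eq arr (by intro hnil; simp [hnil] at h0)]
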